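-- pv_equiv track=rewrite | github.com/miliar/Code_Jam_Webscraper | solutions_python/Problem_34/383.py | recursiveGenerator
-- ===== SOURCE A (Python) =====
-- def recursiveGenerator(dict, word, wordGen, index, wordCount):
--     for c in wordGen[index]:
--         newword = word + c
--         if index == len(wordGen) - 1:
--             if newword in dict:
--                 wordCount += 1
--         else:
--             foundCompatible = False
--             for w in dict:
--                 if w.startswith(newword):
--                     foundCompatible = True
--                     break
--             if foundCompatible:
--                 wordCount = recursiveGenerator(dict, newword, wordGen, index + 1, wordCount)
--     return wordCount
-- ===== SOURCE B (Python) =====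
-- def recursiveGenerator(dict, word, wordGen, index, wordCount):
--     # For each distinct dictionary word of the right length that extends `word`,
--     # add the product of per-position character counts (number of generated
--     # combinations equal to that word), instead of enumerating combinations.
--     n = len(wordGen)
--     total = wordCount
--     for w in set(dict):
--         if len(w) == len(word) + (n - index) and w.startswith(word):
--             mult = 1
--             j = index
--             for ch in w[len(word):]:
--                 mult *= wordGen[j].count(ch)
--                 j += 1
--             total += mult
--     return total
-- ===== Notes on version B (the rewrite author's own statement) =====
-- stated objective: faster
-- what changed: A recursively enumerates every letter combination (with a linear dictionary scan per step) and tests membership; B makes a single pass over the distinct dictionary words, adding for each word of the right shape the product of per-position character counts in wordGen.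
import Mathlib
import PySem

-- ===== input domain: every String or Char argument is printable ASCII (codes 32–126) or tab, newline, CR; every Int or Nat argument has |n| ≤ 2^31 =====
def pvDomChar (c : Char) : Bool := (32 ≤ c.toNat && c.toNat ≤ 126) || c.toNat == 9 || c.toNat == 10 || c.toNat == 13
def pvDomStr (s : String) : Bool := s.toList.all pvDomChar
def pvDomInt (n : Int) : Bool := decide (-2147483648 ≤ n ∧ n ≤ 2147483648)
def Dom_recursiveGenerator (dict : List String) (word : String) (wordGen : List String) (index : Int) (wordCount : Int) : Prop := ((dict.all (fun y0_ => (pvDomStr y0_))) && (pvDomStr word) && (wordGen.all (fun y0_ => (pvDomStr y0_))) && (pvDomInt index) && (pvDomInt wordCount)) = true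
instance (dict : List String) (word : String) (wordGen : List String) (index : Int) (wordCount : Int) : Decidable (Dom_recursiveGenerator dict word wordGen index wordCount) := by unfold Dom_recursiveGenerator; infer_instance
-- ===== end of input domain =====

-- B replaces A's recursive enumeration of all letter combinations (with a linear dictionary
-- scan at every step) by a single pass over the distinct dictionary words, adding for each
-- matching word the product of per-position character counts.

-- ===== PORT A =====
-- fuel (= number of generator positions still to visit) makes the recursion structural;
-- on every input admitted by Pre_ the fuel given below is exactly enough, so this is a
-- step-for-step transliteration of A.  'none => wc' is the IndexError case, outside Pre_.
def recGenA (dict : List String) (wordGen : List String) : Nat → List Char → Int → Int → Int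
  | 0, _, _, wc => wc
  | (fuel+1), word, index, wc =>
    match PySem.List.pyGet? wordGen index with
    | none => wc
    | some s =>
      s.toList.foldl (fun acc c =>
        if index = (wordGen.length : Int) - 1 then
          (if String.ofList (word ++ [c]) ∈ dict then acc + 1 else acc)
        else
          (if dict.any (fun w => PySem.Str.startswith w (String.ofList (word ++ [c]))) then
            recGenA dict wordGen fuel (word ++ [c]) (index + 1) acc
          else acc)) wc

def recursiveGenerator (dict : List String) (word : String) (wordGen : List String) (index : Int) (wordCount : Int) : Int :=
  recGenA dict wordGen ((wordGen.length : Int) - index).toNat word.toList index wordCount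

-- ===== PORT B =====
-- transliteration of Source B; 'wordGen[j]' is ported with pyGet? + getD "" (inside Pre_ every
--access j is in range, so the default is never read).
def recursiveGenerator_alt (dict : List String) (word : String) (wordGen : List String) (index : Int) (wordCount : Int) : Int :=
  let n : Int := wordGen.length
  (PySem.Set.ofList dict).foldl (fun total w =>
    if ((w.toList.length : Int) == (word.toList.length : Int) + (n - index)) &&
       PySem.Str.startswith w word then
      total + ((w.toList.drop word.toList.length).foldl
        (fun (mj : Int × Int) ch =>
          (mj.1 * (PySem.Str.count ((PySem.List.pyGet? wordGen mj.2).getD "") (String.ofList [ch]) : Int),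
           mj.2 + 1))
        (1, index)).1
    else total) wordCount

-- ===== PRECONDITION & SPEC =====
-- Pre_ = exactly the inputs on which the Python A returns normally: 'wordGen[index]' (and every
-- recursive access up to the last position) must be a valid Python index, i.e. -len ≤ index < len.
def Pre_recursiveGenerator (dict : List String) (word : String) (wordGen : List String) (index : Int) (wordCount : Int) : Prop :=
  -(wordGen.length : Int) ≤ index ∧ index < (wordGen.length : Int)

instance (dict : List String) (word : String) (wordGen : List String) (index : Int) (wordCount : Int) : Decidable (Pre_recursiveGenerator dict word wordGen index wordCount) := by unfold Pre_recursiveGenerator; infer_instance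

def pvWitness_recursiveGenerator : List String × String × List String × Int × Int :=
  (["ab", "bb", "xa"], "", ["ab", "b"], 0, 0)

def Spec_recursiveGenerator (dict : List String) (word : String) (wordGen : List String) (index : Int) (wordCount : Int) (out : Int) : Prop := out = recursiveGenerator_alt dict word wordGen index wordCount
instance (dict : List String) (word : String) (wordGen : List String) (index : Int) (wordCount : Int) (out : Int) : Decidable (Spec_recursiveGenerator dict word wordGen index wordCount out) := by unfold Spec_recursiveGenerator; infer_instance

-- ===== CLAIM (what is proved, stated in full; the proofs are below) =====
def Claim_equal_recursiveGenerator : Prop := ∀ (dict : List String) (word : String) (wordGen : List String) (index : Int) (wordCount : Int), Dom_recursiveGenerator dict word wordGen index wordCount → Pre_recursiveGenerator dict word wordGen index wordCount → Spec_recursiveGenerator dict word wordGen index wordCount (recursiveGenerator dict word wordGen index wordCount)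

-- ===== LEMMAS AND PROOFS =====

-- the generator strings A/B actually read, positions index, index+1, … (Python indexing)
def getEff (wordGen : List String) (j : Int) : List Char :=
  ((PySem.List.pyGet? wordGen j).getD "").toList

def gsOf (wordGen : List String) (index : Int) : Nat → List (List Char)
  | 0 => []
  | (k+1) => getEff wordGen index :: gsOf wordGen (index + 1) k

-- number of generated combinations from gs that spell exactly `rest`
def prodCount : List (List Char) → List Char → Int
  | [], [] => 1
  | g :: gs, c :: cs => (g.count c : Int) * prodCount gs cs
  | _, _ => 0

-- contribution of one dictionary word w to the count, starting from prefix `word`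
def hval (word : List Char) (gs : List (List Char)) (w : List Char) : Int :=
  if word.isPrefixOf w then prodCount gs (w.drop word.length) else 0

def sumH (S : List String) (word : List Char) (gs : List (List Char)) : Int :=
  (S.map (fun w => hval word gs w.toList)).sum

theorem prodCount_of_length_ne (gs : List (List Char)) (rest : List Char)
    (h : gs.length ≠ rest.length) : prodCount gs rest = 0 := by
  induction gs generalizing rest with
  | nil => cases rest with
    | nil => simp at h
    | cons c cs => rfl
  | cons g gs ih => cases rest with
    | nil => rfl
    | cons c cs =>
      simp only [prodCount]
      rw [ih cs (by simpa using h)]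
      ring

theorem count_go_singleton (c : Char) : ∀ (fuel : Nat) (l : List Char) (acc : Nat),
    l.length ≤ fuel → PySem.Chars.count.go [c] fuel l acc = acc + l.count c := by
  intro fuel
  induction fuel with
  | zero => intro l acc h; cases l with
    | nil => simp [PySem.Chars.count.go]
    | cons d t => simp at h
  | succ fuel ih =>
    intro l acc h
    cases l with
    | nil => simp [PySem.Chars.count.go]
    | cons d t =>
      simp only [PySem.Chars.count.go]
      by_cases hd : d = c
      · subst hd
        have hpre : ([d].isPrefixOf (d :: t)) = true := by simp [List.isPrefixOf]
        rw [hpre]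
        simp only [if_true]
        have hdrop : List.drop [d].length (d :: t) = t := by simp
        rw [hdrop, ih t (acc + 1) (by simpa using h)]
        simp [List.count_cons]
        omega
      · have : ([c].isPrefixOf (d :: t)) = false := by
          simp [List.isPrefixOf]
          exact fun h' => absurd h'.symm hd
        rw [this]
        simp only [Bool.false_eq_true, if_false]
        rw [ih t acc (by simpa using h)]
        simp [List.count_cons, hd]
  
theorem count_singleton (cs : List Char) (c : Char) :
    PySem.Chars.count cs [c] = cs.count c := by
  simp only [PySem.Chars.count, List.isEmpty_cons, Bool.false_eq_true, if_false]
  rw [count_go_singleton c cs.length cs 0 le_rfl]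
  omega

theorem toList_eq_iff (w : String) (t : List Char) : w.toList = t ↔ w = String.ofList t := by
  constructor
  · intro h; exact String.toList_inj.mp (by simpa using h)
  · intro h; subst h; simp

-- generic loop shape: a fold that adds f x at each step
theorem foldl_shift {β : Type} (f : β → Int) (step : Int → β → Int)
    (hstep : ∀ a x, step a x = a + f x) :
    ∀ (l : List β) (a : Int), l.foldl step a = a + (l.map f).sum := by
  intro l
  induction l with
  | nil => simp
  | cons x l ih => intro a; simp [hstep, ih, add_assoc]

theorem sum_map_swap {β : Type} (F : Char → β → Int) (g : List Char) (S : List β) :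
    (g.map (fun c => (S.map (fun w => F c w)).sum)).sum
      = (S.map (fun w => (g.map (fun c => F c w)).sum)).sum := by
  induction g with
  | nil => simp
  | cons c g ih =>
    simp only [List.map_cons, List.sum_cons, ih]
    rw [← List.sum_map_add]

theorem sum_map_ite_count (g : List Char) (d : Char) (K : Int) :
    (g.map (fun c => if c = d then K else 0)).sum = (g.count d : Int) * K := by
  induction g with
  | nil => simp
  | cons c g ih =>
    by_cases h : c = d
    · subst h; simp [List.count_cons, ih]; ring
    · simp [List.count_cons, h, ih, Ne.symm h]

theorem hval_nil (t w : List Char) : hval t [] w = if w = t then 1 else 0 := by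
  unfold hval
  by_cases hp : t.isPrefixOf w
  · rw [if_pos hp]
    obtain ⟨rest, hrest⟩ := (List.isPrefixOf_iff_prefix.mp hp)
    subst hrest
    cases rest with
    | nil => simp [prodCount]
    | cons c cs => simp [List.drop_left, prodCount]
  · rw [if_neg hp]
    have : ¬ (w = t) := by
      intro h; subst h; exact hp (List.isPrefixOf_iff_prefix.mpr (List.prefix_refl _))
    simp [this]

-- key pointwise identity: summing the contributions of all one-character extensions
-- of `word` over the current generator string g gives the contribution at `word`.
theorem sum_hval_ext (g : List Char) (gs' : List (List Char)) (word w : List Char) :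
    (g.map (fun c => hval (word ++ [c]) gs' w)).sum = hval word (g :: gs') w := by
  by_cases hp : word.isPrefixOf w
  · obtain ⟨rest, hrest⟩ := (List.isPrefixOf_iff_prefix.mp hp)
    subst hrest
    cases rest with
    | nil =>
      have hterm : ∀ c : Char, hval (word ++ [c]) gs' (word ++ []) = 0 := by
        intro c
        unfold hval
        have hnpf : ¬ (((word ++ [c]).isPrefixOf (word ++ [])) = true) := by
          rw [List.isPrefixOf_iff_prefix]
          intro hpf
          have := hpf.length_le
          simp at this
        rw [if_neg hnpf]
      have : hval word (g :: gs') (word ++ []) = 0 := by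
        unfold hval
        rw [if_pos (List.isPrefixOf_iff_prefix.mpr ⟨[], rfl⟩)]
        simp [List.drop_left, prodCount]
      rw [this]
      apply List.sum_eq_zero
      intro x hx
      obtain ⟨c, _, hc⟩ := List.mem_map.mp hx
      rw [← hc, hterm]
    | cons d cs =>
      have hmain : ∀ c : Char, hval (word ++ [c]) gs' (word ++ d :: cs)
          = if c = d then prodCount gs' cs else 0 := by
        intro c
        unfold hval
        by_cases hc : c = d
        · subst hc
          have hpre : (word ++ [c]).isPrefixOf (word ++ c :: cs) := by
            simp [List.isPrefixOf_iff_prefix]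
          rw [if_pos hpre, if_pos rfl]
          have : word ++ c :: cs = (word ++ [c]) ++ cs := by simp
          rw [this, List.drop_left' (by simp)]
        · have hpre : ¬ (((word ++ [c]).isPrefixOf (word ++ d :: cs)) = true) := by
            rw [List.isPrefixOf_iff_prefix, List.prefix_append_right_inj]
            intro hpf
            rw [List.cons_prefix_cons] at hpf
            exact hc hpf.1
          rw [if_neg hpre, if_neg hc]
      have hrhs : hval word (g :: gs') (word ++ d :: cs) = (g.count d : Int) * prodCount gs' cs := by
        unfold hval
        rw [if_pos (List.isPrefixOf_iff_prefix.mpr ⟨d :: cs, rfl⟩)]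
        simp [List.drop_left, prodCount]
      rw [hrhs]
      calc (g.map (fun c => hval (word ++ [c]) gs' (word ++ d :: cs))).sum
          = (g.map (fun c => if c = d then prodCount gs' cs else 0)).sum := by
            congr 1; exact List.map_congr_left (fun c _ => hmain c)
        _ = (g.count d : Int) * prodCount gs' cs := sum_map_ite_count g d _
  · have hz : hval word (g :: gs') w = 0 := by unfold hval; simp [hp]
    rw [hz]
    apply List.sum_eq_zero
    intro x hx
    obtain ⟨c, _, hc⟩ := List.mem_map.mp hx
    rw [← hc]
    unfold hval
    have : ¬ ((word ++ [c]).isPrefixOf w) := by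
      intro h
      exact hp (List.isPrefixOf_iff_prefix.mpr
        (List.IsPrefix.trans ⟨[c], by simp⟩ (List.isPrefixOf_iff_prefix.mp h)))
    simp [this]

theorem sum_indicator_mem (S : List String) (t : List Char) (hnd : S.Nodup) :
    (S.map (fun w => if w.toList = t then (1 : Int) else 0)).sum
      = if String.ofList t ∈ S then 1 else 0 := by
  induction S with
  | nil => simp
  | cons w S ih =>
    have hnd' := (List.nodup_cons.mp hnd)
    by_cases h : w.toList = t
    · have hw : w = String.ofList t := (toList_eq_iff w t).mp h
      subst hw
      have : String.ofList t ∉ S := hnd'.1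
      simp [h, ih hnd'.2, this]
    · have hw : ¬ (String.ofList t = w) := by
        intro he
        apply h
        rw [← he]
        simp
      simp only [List.map_cons, List.sum_cons, if_neg h, zero_add, ih hnd'.2, List.mem_cons]
      by_cases hm : String.ofList t ∈ S <;> simp [hm, hw]

-- membership branch of A's last position, summed over the distinct dictionary words
theorem mem_eq_sum_hval_nil (dict : List String) (t : List Char) :
    (if String.ofList t ∈ dict then (1 : Int) else 0)
      = ((PySem.Set.ofList dict).map (fun w => hval t [] w.toList)).sum := by
  have h1 : ((PySem.Set.ofList dict).map (fun w => hval t [] w.toList)).sum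
      = ((PySem.Set.ofList dict).map (fun w => if w.toList = t then (1 : Int) else 0)).sum := by
    congr 1
    exact List.map_congr_left (fun w _ => hval_nil t w.toList)
  rw [h1, sum_indicator_mem _ _ (PySem.Set.nodup_ofList dict)]
  simp [PySem.Set.mem_ofList]

theorem startswith_iff_prefix (w : String) (t : List Char) :
    PySem.Str.startswith w (String.ofList t) = true ↔ t <+: w.toList := by
  rw [show PySem.Str.startswith w (String.ofList t)
      = PySem.Chars.startswith w.toList (String.ofList t).toList from by simp]
  rw [String.toList_ofList, PySem.Chars.startswith_iff]

theorem sumH_zero_of_incompat (dict : List String) (t : List Char) (gs : List (List Char))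
    (h : dict.any (fun w => PySem.Str.startswith w (String.ofList t)) = false) :
    sumH (PySem.Set.ofList dict) t gs = 0 := by
  unfold sumH
  apply List.sum_eq_zero
  intro x hx
  obtain ⟨w, hwS, hw⟩ := List.mem_map.mp hx
  rw [← hw]
  unfold hval
  have hnp : ¬ (t.isPrefixOf w.toList) := by
    intro hpre
    have hsw : PySem.Str.startswith w (String.ofList t) = true :=
      (startswith_iff_prefix w t).mpr (List.isPrefixOf_iff_prefix.mp hpre)
    have hfa := List.any_eq_false.mp h w ((PySem.Set.mem_ofList _ _).mp hwS)
    have hsw' : PySem.Chars.startswith w.toList t = true := by simpa using hsw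
    simp [hsw'] at hfa
  simp [hnp]

-- ===== A-side characterisation =====
theorem recGenA_eq (dict wordGen : List String) :
    ∀ (k : Nat) (index : Int) (word : List Char) (wc : Int),
    1 ≤ k → index + (k : Int) = (wordGen.length : Int) → -(wordGen.length : Int) ≤ index →
    recGenA dict wordGen k word index wc
      = wc + sumH (PySem.Set.ofList dict) word (gsOf wordGen index k) := by
  intro k
  induction k with
  | zero => intro _ _ _ h; omega
  | succ k ih =>
    intro index word wc _ hidx hge
    have hlt : index < (wordGen.length : Int) := by omega
    have hin : PySem.Raise.InRange wordGen.length index := ⟨hge, hlt⟩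
    obtain ⟨s, hs⟩ : ∃ s, PySem.List.pyGet? wordGen index = some s := by
      cases hg : PySem.List.pyGet? wordGen index with
      | none => exact absurd hin ((PySem.List.pyGet?_eq_none_iff _ _).mp hg)
      | some s => exact ⟨s, rfl⟩
    have hEff : getEff wordGen index = s.toList := by unfold getEff; rw [hs]; rfl
    simp only [recGenA, hs]
    cases k with
    | zero =>
      have hlast : index = (wordGen.length : Int) - 1 := by omega
      rw [foldl_shift (fun c => if String.ofList (word ++ [c]) ∈ dict then (1 : Int) else 0)
        _ ?lastStep]
      case lastStep =>
        intro a c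
        rw [if_pos hlast]
        show _ = a + (if String.ofList (word ++ [c]) ∈ dict then (1 : Int) else 0)
        rcases Decidable.em (String.ofList (word ++ [c]) ∈ dict) with hm | hm
        · rw [if_pos hm, if_pos hm]
        · rw [if_neg hm, if_neg hm]
          omega
      congr 1
      have : ∀ c ∈ s.toList,
          (if String.ofList (word ++ [c]) ∈ dict then (1 : Int) else 0)
            = ((PySem.Set.ofList dict).map (fun w => hval (word ++ [c]) [] w.toList)).sum := by
        intro c _; exact mem_eq_sum_hval_nil dict (word ++ [c])
      rw [List.map_congr_left this, sum_map_swap, gsOf, gsOf, hEff]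
      unfold sumH
      congr 1
      exact List.map_congr_left (fun w _ => sum_hval_ext s.toList [] word w.toList)
    | succ k' =>
      have hnl : ¬ (index = (wordGen.length : Int) - 1) := by omega
      rw [foldl_shift (fun c => sumH (PySem.Set.ofList dict) (word ++ [c])
            (gsOf wordGen (index + 1) (k' + 1)))
        _ ?step]
      case step =>
        intro a c
        rw [if_neg hnl]
        cases hany : dict.any (fun w => PySem.Str.startswith w (String.ofList (word ++ [c]))) with
        | false => simp [sumH_zero_of_incompat dict (word ++ [c]) _ hany]
        | true =>
          simp only [if_true]
          exact ih (index + 1) (word ++ [c]) a (by omega) (by omega) (by omega)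
      congr 1
      simp only [sumH]
      rw [sum_map_swap, show gsOf wordGen index (k' + 1 + 1)
        = getEff wordGen index :: gsOf wordGen (index + 1) (k' + 1) from rfl, hEff]
      exact congrArg List.sum (List.map_congr_left
        (fun w _ => sum_hval_ext s.toList (gsOf wordGen (index + 1) (k' + 1)) word w.toList))

-- ===== B-side characterisation =====
theorem gsOf_length (wordGen : List String) :
    ∀ (k : Nat) (index : Int), (gsOf wordGen index k).length = k := by
  intro k
  induction k with
  | zero => intro _; rfl
  | succ k ih => intro index; simp [gsOf, ih]

theorem inner_fold_eq (wordGen : List String) :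
    ∀ (rest : List Char) (j m : Int),
    (rest.foldl (fun (mj : Int × Int) ch =>
        (mj.1 * (PySem.Str.count ((PySem.List.pyGet? wordGen mj.2).getD "") (String.ofList [ch]) : Int),
         mj.2 + 1)) (m, j)).1
      = m * prodCount (gsOf wordGen j rest.length) rest := by
  intro rest
  induction rest with
  | nil => intro j m; simp [gsOf, prodCount]
  | cons ch cs ih =>
    intro j m
    simp only [List.foldl_cons]
    rw [ih (j + 1) _]
    have hcnt : (PySem.Str.count ((PySem.List.pyGet? wordGen j).getD "") (String.ofList [ch]) : Int)
        = ((getEff wordGen j).count ch : Int) := by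
      have : PySem.Str.count ((PySem.List.pyGet? wordGen j).getD "") (String.ofList [ch])
          = PySem.Chars.count (getEff wordGen j) [ch] := by
        simp [getEff]
      rw [this, count_singleton]
    rw [hcnt]
    show (m * _) * prodCount (gsOf wordGen (j + 1) cs.length) cs = _
    rw [show gsOf wordGen j (ch :: cs).length
      = getEff wordGen j :: gsOf wordGen (j + 1) cs.length from rfl]
    simp [prodCount]
    ring

theorem alt_eq (dict : List String) (word : String) (wordGen : List String) (index wc : Int)
    (hlt : index < (wordGen.length : Int)) :
    recursiveGenerator_alt dict word wordGen index wc
      = wc + sumH (PySem.Set.ofList dict) word.toList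
          (gsOf wordGen index ((wordGen.length : Int) - index).toNat) := by
  set k : Nat := ((wordGen.length : Int) - index).toNat with hk
  have hkInt : (k : Int) = (wordGen.length : Int) - index := by omega
  unfold recursiveGenerator_alt
  rw [foldl_shift (fun w => hval word.toList (gsOf wordGen index k) w.toList)
      _ ?stepB]
  case stepB =>
    intro a w
    by_cases hc : (((w.toList.length : Int) == (word.toList.length : Int)
        + ((wordGen.length : Int) - index)) && PySem.Str.startswith w word) = true
    · rw [if_pos hc]
      obtain ⟨hlen, hsw⟩ := Bool.and_eq_true_iff.mp hc
      have hlen' : (w.toList.length : Int) = (word.toList.length : Int) + (k : Int) := by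
        rw [hkInt]; exact beq_iff_eq.mp hlen
      have hpre : word.toList <+: w.toList := by
        have := (startswith_iff_prefix w word.toList)
        rw [show String.ofList word.toList = word from String.toList_inj.mp (by simp)] at this
        exact this.mp hsw
      have hhval : hval word.toList (gsOf wordGen index k) w.toList
          = prodCount (gsOf wordGen index k) (w.toList.drop word.toList.length) := by
        unfold hval
        rw [if_pos (List.isPrefixOf_iff_prefix.mpr hpre)]
      show a + (List.foldl _ (1, index) (w.toList.drop word.toList.length)).1
          = a + hval word.toList (gsOf wordGen index k) w.toList
      rw [hhval, inner_fold_eq wordGen _ index 1, one_mul]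
      have hrest : (w.toList.drop word.toList.length).length = k := by
        have := hpre.length_le
        simp only [List.length_drop]
        omega
      rw [hrest]
    · rw [if_neg hc]
      have hz : hval word.toList (gsOf wordGen index k) w.toList = 0 := by
        unfold hval
        by_cases hpre : word.toList.isPrefixOf w.toList
        · rw [if_pos hpre]
          apply prodCount_of_length_ne
          rw [gsOf_length]
          -- the length condition must be false here
          have hsw : PySem.Str.startswith w word = true := by
            have := (startswith_iff_prefix w word.toList)
            rw [show String.ofList word.toList = word from String.toList_inj.mp (by simp)] at this
            exact this.mpr (List.isPrefixOf_iff_prefix.mp hpre)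
          have hlenne : ¬ ((w.toList.length : Int)
              = (word.toList.length : Int) + ((wordGen.length : Int) - index)) := by
            intro he
            exact hc (by simp only [Bool.and_eq_true, beq_iff_eq]; exact ⟨he, hsw⟩)
          have hle := (List.isPrefixOf_iff_prefix.mp hpre).length_le
          intro heq
          apply hlenne
          simp only [List.length_drop] at heq
          omega
        · rw [if_neg hpre]
      show a = a + hval word.toList (gsOf wordGen index k) w.toList
      rw [hz, add_zero]
  rfl

-- ===== VERDICT (by name: the statement is the Claim_ definition above) =====
theorem recursiveGenerator_spec : Claim_equal_recursiveGenerator := by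
  intro dict word wordGen index wordCount _ hpre
  obtain ⟨hge, hlt⟩ := hpre
  unfold Spec_recursiveGenerator
  set k : Nat := ((wordGen.length : Int) - index).toNat with hk
  have h1 : recursiveGenerator dict word wordGen index wordCount
      = wordCount + sumH (PySem.Set.ofList dict) word.toList (gsOf wordGen index k) := by
    unfold recursiveGenerator
    exact recGenA_eq dict wordGen k index word.toList wordCount (by omega) (by omega) hge
  rw [h1, alt_eq dict word wordGen index wordCount hlt]
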